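-- pv_equiv track=rewrite | github.com/CountChu/LeetCodePython | learn_17_hash_table/solutions/0706-hash-map-s2.py | find
-- ===== SOURCE A (Python) =====
-- def find(b, n, key):
--     y = key % n
--     found = False
--     x = -1
--     x_none = -1
--     for i, pair in enumerate(b[y]):
--         if pair == None:
--             if x_none == -1:
--                 x_none = i
--         else:
--             if pair[0] == key:
--                 found = True
--                 x = i
--                 break
--
--     if found:
--         return y, found, x
--     else:
--         return y, found, x_none
-- ===== SOURCE B (Python) =====
-- def find(b, n, key):
--     y = key % n
--     row = b[y]
--     for i, pair in enumerate(row):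
--         if pair is not None and pair[0] == key:
--             return y, True, i
--     for i, pair in enumerate(row):
--         if pair is None:
--             return y, False, i
--     return y, False, -1
-- ===== Notes on version B (the rewrite author's own statement) =====
-- stated objective: simpler
-- what changed: Replaces the single combined scan with mixed state (found/x/x_none flags) by two independent early-returning scans: one for the key, then one for the first empty slot; no sentinel-tracking state is carried.
import Mathlib
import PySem

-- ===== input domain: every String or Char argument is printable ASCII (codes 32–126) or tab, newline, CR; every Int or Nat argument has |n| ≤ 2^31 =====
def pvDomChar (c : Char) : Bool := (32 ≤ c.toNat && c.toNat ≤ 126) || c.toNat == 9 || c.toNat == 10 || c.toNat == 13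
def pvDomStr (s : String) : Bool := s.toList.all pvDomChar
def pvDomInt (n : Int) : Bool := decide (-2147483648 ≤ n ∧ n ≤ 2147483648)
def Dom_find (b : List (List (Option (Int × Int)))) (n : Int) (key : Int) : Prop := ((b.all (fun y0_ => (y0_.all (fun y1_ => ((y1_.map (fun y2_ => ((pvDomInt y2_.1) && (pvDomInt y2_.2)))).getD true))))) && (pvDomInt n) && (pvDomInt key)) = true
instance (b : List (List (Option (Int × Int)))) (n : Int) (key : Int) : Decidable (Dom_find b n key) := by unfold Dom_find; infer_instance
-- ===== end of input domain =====

-- B splits A's single combined scan (flags found/x/x_none) into two independent early-returning scans: key first, then first empty slot; simpler, no mixed state.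


-- ===== PORT A =====
-- A's single for-loop with state (found, x, x_none) and break on key match.
def findLoopA (key : Int) : List (Option (Int × Int)) → Int → Int → Bool × Int × Int
  | [], _, x_none => (false, -1, x_none)
  | none :: rest, i, x_none =>
      findLoopA key rest (i + 1) (if x_none = -1 then i else x_none)
  | some p :: rest, i, x_none =>
      if p.1 = key then (true, i, x_none)
      else findLoopA key rest (i + 1) x_none

def find (b : List (List (Option (Int × Int)))) (n : Int) (key : Int) : Int × Bool × Int :=
  if n = 0 then (0, false, 0)  -- Python: ZeroDivisionError (excluded by Pre_find)
  else
    let y := PySem.Int.mod key n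
    match PySem.List.pyGet? b y with
    | none => (0, false, 0)    -- Python: IndexError (excluded by Pre_find)
    | some row =>
        let r := findLoopA key row 0 (-1)
        if r.1 then (y, true, r.2.1) else (y, false, r.2.2)

-- ===== PORT B =====
-- B's first scan: index of the first pair matching key.
def firstKey (key : Int) : List (Option (Int × Int)) → Int → Option Int
  | [], _ => none
  | none :: rest, i => firstKey key rest (i + 1)
  | some p :: rest, i => if p.1 = key then some i else firstKey key rest (i + 1)

-- B's second scan: index of the first None slot.
def firstNone : List (Option (Int × Int)) → Int → Option Int
  | [], _ => none
  | none :: _, i => some i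
  | some _ :: rest, i => firstNone rest (i + 1)

def find_alt (b : List (List (Option (Int × Int)))) (n : Int) (key : Int) : Int × Bool × Int :=
  if n = 0 then (0, false, 0)  -- Python: ZeroDivisionError (excluded by Pre_find)
  else
    let y := PySem.Int.mod key n
    match PySem.List.pyGet? b y with
    | none => (0, false, 0)    -- Python: IndexError (excluded by Pre_find)
    | some row =>
        match firstKey key row 0 with
        | some i => (y, true, i)
        | none =>
            match firstNone row 0 with
            | some i => (y, false, i)
            | none => (y, false, -1)

-- ===== PRECONDITION & SPEC =====
-- Pre_ excludes only inputs where A raises: n = 0 (ZeroDivisionError) or key % n out of range for b (IndexError).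
def Pre_find (b : List (List (Option (Int × Int)))) (n : Int) (key : Int) : Prop :=
  n ≠ 0 ∧ PySem.Raise.InRange b.length (PySem.Int.mod key n)
instance (b : List (List (Option (Int × Int)))) (n : Int) (key : Int) : Decidable (Pre_find b n key) := by unfold Pre_find; infer_instance

def pvWitness_find : (List (List (Option (Int × Int)))) × Int × Int := ([[none, some (5, 7)]], 1, 5)

def Spec_find (b : List (List (Option (Int × Int)))) (n : Int) (key : Int) (out : Int × Bool × Int) : Prop := out = find_alt b n key
instance (b : List (List (Option (Int × Int)))) (n : Int) (key : Int) (out : Int × Bool × Int) : Decidable (Spec_find b n key out) := by unfold Spec_find; infer_instance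

-- ===== CLAIM (what is proved, stated in full; the proofs are below) =====
def Claim_equal_find : Prop := ∀ (b : List (List (Option (Int × Int)))) (n : Int) (key : Int), Dom_find b n key → Pre_find b n key → Spec_find b n key (find b n key)

-- ===== LEMMAS AND PROOFS =====

-- A's combined loop, packaged into the final pair, equals B's two scans.
theorem loop_eq (key : Int) (row : List (Option (Int × Int))) (i x_none : Int) (y : Int)
    (hi : 0 ≤ i) (hx : x_none = -1 ∨ 0 ≤ x_none) :
    (let r := findLoopA key row i x_none
     if r.1 then (y, true, r.2.1) else (y, false, r.2.2)) =
    (match firstKey key row i with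
     | some j => (y, true, j)
     | none =>
         match firstNone row i with
         | some j => (y, false, if x_none = -1 then j else x_none)
         | none => (y, false, x_none)) := by
  induction row generalizing i x_none with
  | nil => simp [findLoopA, firstKey, firstNone]
  | cons hd rest ih =>
    cases hd with
    | none =>
      have h1 : (0:Int) ≤ i + 1 := by omega
      have hx' : (if x_none = -1 then i else x_none) = -1 ∨ 0 ≤ (if x_none = -1 then i else x_none) := by
        split_ifs <;> omega
      have := ih (i + 1) (if x_none = -1 then i else x_none) h1 hx'
      simp only [findLoopA, firstKey, firstNone, this]
      have hge : (0:Int) ≤ (if x_none = -1 then i else x_none) := by split_ifs <;> omega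
      have hne : (if x_none = -1 then i else x_none) ≠ -1 := by omega
      cases hfk : firstKey key rest (i + 1) with
      | some j => simp
      | none =>
        cases hfn : firstNone rest (i + 1) with
        | some j => simp [hne]
        | none => simp
    | some p =>
      by_cases hp : p.1 = key
      · simp [findLoopA, firstKey, hp]
      · have h1 : (0:Int) ≤ i + 1 := by omega
        have := ih (i + 1) x_none h1 hx
        simp only [findLoopA, firstKey, firstNone, hp, if_false, this]

-- ===== VERDICT (by name: the statement is the Claim_ definition above) =====
theorem find_spec : Claim_equal_find := by
  intro b n key _ hpre
  obtain ⟨hn, hrange⟩ := hpre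
  unfold Spec_find find find_alt
  simp only [if_neg hn]
  have hsome : (PySem.List.pyGet? b (PySem.Int.mod key n)).isSome := by
    rw [Option.isSome_iff_ne_none]
    intro hnone
    rw [PySem.List.pyGet?_eq_none_iff] at hnone
    exact hnone hrange
  obtain ⟨row, hrow⟩ := Option.isSome_iff_exists.mp hsome
  rw [hrow]
  have := loop_eq key row 0 (-1) (PySem.Int.mod key n) (by omega) (Or.inl rfl)
  simp only [this]
  cases hfk : firstKey key row 0 with
  | some j => simp
  | none =>
    cases hfn : firstNone row 0 with
    | some j => simp
    | none => simp
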